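-- pv_equiv track=rewrite | github.com/ml4ai/skema | skema/img2mml/preprocessing/preprocess_mml.py | remove_single_mrow_pairs
-- ===== SOURCE A (Python) =====
-- def remove_single_mrow_pairs(lst):
--     stack = []
--     for i, elem in enumerate(lst):
--         if "<mrow" in elem:
--             stack.append(i)
--         elif elem == "</mrow>":
--             start = stack.pop()
--             if i - start <= 2:
--                 lst.pop(i)
--                 lst.pop(start)
--                 return remove_single_mrow_pairs(lst)
--     return lst
-- ===== SOURCE B (Python) =====
-- def remove_single_mrow_pairs(lst):
--     out = []
--     stack = []
--     for elem in lst: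
--         if "<mrow" in elem:
--             stack.append(len(out))
--             out.append(elem)
--         elif elem == "</mrow>":
--             start = stack.pop()
--             if len(out) - start <= 2:
--                 del out[start]
--             else:
--                 out.append(elem)
--         else:
--             out.append(elem)
--     return out
-- ===== Notes on version B (the rewrite author's own statement) =====
-- stated objective: alternative
-- what changed: A restarts a full scan-and-rescan recursion after every collapsed pair; B makes a single left-to-right pass with a stack of open positions in the output list, collapsing each eligible mrow pair incrementally.
import Mathlib
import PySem

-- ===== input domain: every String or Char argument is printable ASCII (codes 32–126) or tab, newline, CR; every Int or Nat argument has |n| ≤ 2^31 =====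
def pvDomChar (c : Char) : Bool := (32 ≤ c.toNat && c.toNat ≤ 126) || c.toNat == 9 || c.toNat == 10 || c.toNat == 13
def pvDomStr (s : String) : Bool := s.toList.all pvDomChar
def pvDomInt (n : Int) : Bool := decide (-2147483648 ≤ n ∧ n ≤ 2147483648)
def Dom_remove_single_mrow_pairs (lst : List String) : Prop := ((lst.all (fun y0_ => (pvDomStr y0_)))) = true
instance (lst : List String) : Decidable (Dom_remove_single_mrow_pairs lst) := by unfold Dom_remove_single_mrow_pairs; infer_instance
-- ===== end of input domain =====

-- B replaces A's restart-and-rescan recursion by a single left-to-right stack pass that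
-- collapses eligible <mrow> pairs incrementally; the equivalence proved is about the
-- RETURN value only (Python A mutates its argument in place, B does not).

-- ===== PORT A =====
-- '"<mrow" in elem'
def pvOpn (e : String) : Bool := PySem.Str.isIn "<mrow" e

inductive PvScanRes where
  | found : Nat → Nat → PvScanRes
  | clean : PvScanRes
  | err   : PvScanRes
deriving DecidableEq, Repr

-- A's for-loop over enumerate(lst): push index of every '<mrow' element, pop at '</mrow>';
-- 'found start i' = the first pair with i - start <= 2 (where A pops both and recurses),
-- 'clean' = loop finishes, 'err' = stack.pop() on an empty stack (Python raises IndexError).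
def pvScanA : List String → Nat → List Nat → PvScanRes
  | [], _, _ => .clean
  | e :: rest, i, stack =>
    if pvOpn e then pvScanA rest (i+1) (i :: stack)
    else if e = "</mrow>" then
      match stack with
      | start :: stack' =>
        if (i : Int) - (start : Int) ≤ 2 then .found start i else pvScanA rest (i+1) stack'
      | [] => .err
    else pvScanA rest (i+1) stack

theorem pvScanA_found_lt : ∀ (rest : List String) (k : Nat) (s : List Nat) (start i : Nat),
    pvScanA rest k s = .found start i → k ≤ i ∧ i < k + rest.length := by
  intro rest
  induction rest with
  | nil => intro k s start i h; simp [pvScanA] at h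
  | cons e rest ih =>
    intro k s start i h
    simp only [pvScanA] at h
    split at h
    · have := ih (k+1) (k :: s) start i h; simp at *; omega
    · split at h
      · split at h
        · split at h
          · injection h with h1 h2; subst h1; subst h2; simp
          · have := ih (k+1) _ start i h; simp at *; omega
        · exact absurd h (by simp)
      · have := ih (k+1) s start i h; simp at *; omega

def remove_single_mrow_pairs (lst : List String) : List String :=
  match h : pvScanA lst 0 [] with
  | .found start i => remove_single_mrow_pairs ((lst.eraseIdx i).eraseIdx start)
  | .clean => lst
  | .err => lst   -- Python raises IndexError here; excluded by Pre_
termination_by lst.length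
decreasing_by
  have hi := (pvScanA_found_lt lst 0 [] start i h).2
  have hi' : i < lst.length := by omega
  have h1 : (lst.eraseIdx i).length = lst.length - 1 := by
    rw [List.length_eraseIdx]; simp [hi']
  have h2 := List.length_eraseIdx_le (lst.eraseIdx i) start
  omega

-- ===== PORT B =====
-- one step of B's loop body, state = (out, stack of positions in out)
def pvStepB (st : List String × List Nat) (e : String) : List String × List Nat :=
  if pvOpn e then (st.1 ++ [e], st.1.length :: st.2)
  else if e = "</mrow>" then
    match st.2 with
    | start :: stack' =>
      if (st.1.length : Int) - (start : Int) ≤ 2 then (st.1.eraseIdx start, stack')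
      else (st.1 ++ [e], stack')
    | [] => (st.1 ++ [e], [])   -- Python B's stack.pop() raises here; excluded by Pre_
  else (st.1 ++ [e], st.2)

def remove_single_mrow_pairs_alt (lst : List String) : List String :=
  (lst.foldl pvStepB ([], [])).1

-- ===== PRECONDITION & SPEC =====
-- '</mrow>' element as A's branch order sees it (the open test comes first)
def pvCl (e : String) : Bool := !pvOpn e && (e == "</mrow>")

-- Pre_ excludes exactly the inputs where a '</mrow>' arrives with no unmatched '<mrow' element
-- before it (a prefix with more closes than opens): there Python A (and B) raise IndexError.
def Pre_remove_single_mrow_pairs (lst : List String) : Prop :=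
  ∀ n, n ≤ lst.length → ((lst.take n).countP pvCl) ≤ ((lst.take n).countP pvOpn)
instance (lst : List String) : Decidable (Pre_remove_single_mrow_pairs lst) := by
  unfold Pre_remove_single_mrow_pairs; infer_instance

def pvWitness_remove_single_mrow_pairs : List String := ["<mrow>", "<mi>x</mi>", "</mrow>"]

def Spec_remove_single_mrow_pairs (lst : List String) (out : List String) : Prop := out = remove_single_mrow_pairs_alt lst
instance (lst : List String) (out : List String) : Decidable (Spec_remove_single_mrow_pairs lst out) := by unfold Spec_remove_single_mrow_pairs; infer_instance

-- ===== CLAIM (what is proved, stated in full; the proofs are below) =====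
def Claim_equal_remove_single_mrow_pairs : Prop := ∀ (lst : List String), Dom_remove_single_mrow_pairs lst → Pre_remove_single_mrow_pairs lst → Spec_remove_single_mrow_pairs lst (remove_single_mrow_pairs lst)

-- ===== LEMMAS AND PROOFS =====

theorem pv_opn_close : pvOpn "</mrow>" = false := by decide

-- stack invariant for B's state while scanning (mirrors what A's scan history guarantees)
def pvInv (out : List String) (s : List Nat) : Prop :=
  s.Pairwise (· > ·) ∧
  (∀ j ∈ s, j < out.length ∧ pvOpn (out.getD j "") = true) ∧
  (∀ t, t < out.length → pvOpn (out.getD t "") = true →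
    t ∈ s ∨ ∃ c, t < c ∧ c < out.length ∧ pvCl (out.getD c "") = true) ∧
  (∀ t, t < out.length → pvCl (out.getD t "") = true →
    ∃ j', j' + 2 < t ∧ ∀ j ∈ s, j < j' ∨ t < j)

-- a clean scan means B appends every element
theorem pv_clean_fold : ∀ (rest : List String) (s : List Nat) (out : List String),
    pvScanA rest out.length s = .clean →
    (List.foldl pvStepB (out, s) rest).1 = out ++ rest := by
  intro rest
  induction rest with
  | nil => intro s out _; simp
  | cons e rest ih =>
    intro s out h
    simp only [pvScanA] at h
    simp only [List.foldl_cons]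
    by_cases ho : pvOpn e
    · rw [if_pos ho] at h
      have hst : pvStepB (out, s) e = (out ++ [e], out.length :: s) := by
        simp [pvStepB, ho]
      rw [hst]
      have h' : pvScanA rest (out ++ [e]).length (out.length :: s) = .clean := by
        simpa using h
      have := ih (out.length :: s) (out ++ [e]) h'
      simpa using this
    · rw [if_neg ho] at h
      by_cases hc : e = "</mrow>"
      · rw [if_pos hc] at h
        match s with
        | [] => exact absurd h (by simp)
        | start :: s' =>
          dsimp only at h
          by_cases hg : (out.length : Int) - (start : Int) ≤ 2
          · rw [if_pos hg] at h; exact absurd h (by simp)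
          · rw [if_neg hg] at h
            have hst : pvStepB (out, start :: s') e = (out ++ [e], s') := by
              subst hc; simp [pvStepB, pv_opn_close, hg]
            rw [hst]
            have h' : pvScanA rest (out ++ [e]).length s' = .clean := by simpa using h
            have := ih s' (out ++ [e]) h'
            simpa using this
      · rw [if_neg hc] at h
        have hst : pvStepB (out, s) e = (out ++ [e], s) := by
          simp [pvStepB, ho, hc]
        rw [hst]
        have h' : pvScanA rest (out ++ [e]).length s = .clean := by simpa using h
        have := ih s (out ++ [e]) h'
        simpa using this

theorem pv_getD_lt (out : List String) (e : String) (t : Nat) (h : t < out.length) :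
    (out ++ [e]).getD t "" = out.getD t "" := by
  simp [List.getD_eq_getElem?_getD, List.getElem?_append_left h]

theorem pv_getD_self (out : List String) (e : String) :
    (out ++ [e]).getD out.length "" = e := by
  have := List.getD_append_right out [e] (d := "") (n := out.length) le_rfl
  simpa using this

theorem pv_inv_push (out : List String) (s : List Nat) (e : String)
    (ho : pvOpn e = true) (h : pvInv out s) : pvInv (out ++ [e]) (out.length :: s) := by
  obtain ⟨h1, h2, h3, h4⟩ := h
  refine ⟨?_, ?_, ?_, ?_⟩
  · exact List.Pairwise.cons (fun j hj => (h2 j hj).1) h1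
  · intro j hj
    rcases List.mem_cons.mp hj with rfl | hj
    · simp [ho]
    · have := h2 j hj
      rw [pv_getD_lt out e j this.1]
      exact ⟨by simp; omega, this.2⟩
  · intro t ht hop
    simp at ht
    rcases Nat.lt_or_ge t out.length with htl | hge
    · rw [pv_getD_lt out e t htl] at hop
      rcases h3 t htl hop with hmem | ⟨c, hc1, hc2, hc3⟩
      · exact Or.inl (List.mem_cons_of_mem _ hmem)
      · exact Or.inr ⟨c, hc1, by simp; omega, by rwa [pv_getD_lt out e c hc2]⟩
    · have : t = out.length := by omega
      subst this
      exact Or.inl (List.mem_cons_self)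
  · intro t ht hcl
    simp at ht
    rcases Nat.lt_or_ge t out.length with htl | hge
    · rw [pv_getD_lt out e t htl] at hcl
      obtain ⟨j', hj1, hj2⟩ := h4 t htl hcl
      refine ⟨j', hj1, ?_⟩
      intro j hj
      rcases List.mem_cons.mp hj with rfl | hj
      · exact Or.inr htl
      · exact hj2 j hj
    · have : t = out.length := by omega
      subst this
      rw [pv_getD_self] at hcl
      simp [pvCl, ho] at hcl
  
theorem pv_inv_neutral (out : List String) (s : List Nat) (e : String)
    (ho : pvOpn e = false) (hc : e ≠ "</mrow>") (h : pvInv out s) : pvInv (out ++ [e]) s := by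
  obtain ⟨h1, h2, h3, h4⟩ := h
  refine ⟨h1, ?_, ?_, ?_⟩
  · intro j hj
    have := h2 j hj
    rw [pv_getD_lt out e j this.1]
    exact ⟨by simp; omega, this.2⟩
  · intro t ht hop
    simp at ht
    rcases Nat.lt_or_ge t out.length with htl | hge
    · rw [pv_getD_lt out e t htl] at hop
      rcases h3 t htl hop with hmem | ⟨c, hc1, hc2, hc3⟩
      · exact Or.inl hmem
      · exact Or.inr ⟨c, hc1, by simp; omega, by rwa [pv_getD_lt out e c hc2]⟩
    · have : t = out.length := by omega
      subst this
      rw [pv_getD_self] at hop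
      simp [ho] at hop
  · intro t ht hcl
    simp at ht
    rcases Nat.lt_or_ge t out.length with htl | hge
    · rw [pv_getD_lt out e t htl] at hcl
      exact h4 t htl hcl
    · have : t = out.length := by omega
      subst this
      rw [pv_getD_self] at hcl
      simp [pvCl, hc] at hcl

theorem pv_inv_pop (out : List String) (j : Nat) (s2 : List Nat) (e : String)
    (ho : pvOpn e = false) (hc : e = "</mrow>")
    (hg : ¬ ((out.length : Int) - (j : Int) ≤ 2)) (h : pvInv out (j :: s2)) :
    pvInv (out ++ [e]) s2 := by
  obtain ⟨h1, h2, h3, h4⟩ := h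
  have hjlt : j < out.length := (h2 j (List.mem_cons_self)).1
  have hcl_e : pvCl e = true := by rw [hc]; decide
  refine ⟨h1.sublist (List.sublist_cons_self j s2), ?_, ?_, ?_⟩
  · intro x hx
    have := h2 x (List.mem_cons_of_mem _ hx)
    rw [pv_getD_lt out e x this.1]
    exact ⟨by simp; omega, this.2⟩
  · intro t ht hop
    simp at ht
    rcases Nat.lt_or_ge t out.length with htl | hge
    · rw [pv_getD_lt out e t htl] at hop
      rcases h3 t htl hop with hmem | ⟨c, hc1, hc2, hc3⟩
      · rcases List.mem_cons.mp hmem with rfl | hmem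
        · -- the popped open: its close is e at position out.length
          exact Or.inr ⟨out.length, htl, by simp, by rw [pv_getD_self]; exact hcl_e⟩
        · exact Or.inl hmem
      · exact Or.inr ⟨c, hc1, by simp; omega, by rwa [pv_getD_lt out e c hc2]⟩
    · have : t = out.length := by omega
      subst this
      rw [pv_getD_self, hc] at hop
      simp [pv_opn_close] at hop
  · intro t ht hcl
    simp at ht
    rcases Nat.lt_or_ge t out.length with htl | hge
    · rw [pv_getD_lt out e t htl] at hcl
      obtain ⟨j', hj1, hj2⟩ := h4 t htl hcl
      exact ⟨j', hj1, fun x hx => hj2 x (List.mem_cons_of_mem _ hx)⟩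
    · have : t = out.length := by omega
      subst this
      -- e closes j with gap > 2, and every remaining stack entry is below j
      refine ⟨j, by omega, ?_⟩
      intro x hx
      exact Or.inl ((List.pairwise_cons.mp h1).1 x hx)

theorem pv_found_main : ∀ (rest : List String) (s : List Nat) (out : List String) (start i : Nat),
    pvScanA rest out.length s = .found start i → pvInv out s →
    ∃ u c v sp, rest = u ++ c :: v ∧ out.length + u.length = i ∧
      List.foldl pvStepB (out, s) u = (out ++ u, start :: sp) ∧
      pvOpn c = false ∧ c = "</mrow>" ∧
      start < i ∧ (i : Int) - (start : Int) ≤ 2 ∧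
      pvOpn ((out ++ u).getD start "") = true ∧
      (∀ t, start < t → t < i → pvOpn ((out ++ u).getD t "") = false ∧ (out ++ u).getD t "" ≠ "</mrow>") := by
  intro rest
  induction rest with
  | nil => intro s out start i h _; simp [pvScanA] at h
  | cons e rest ih =>
    intro s out start i h hinv
    simp only [pvScanA] at h
    by_cases ho : pvOpn e
    · rw [if_pos ho] at h
      have h' : pvScanA rest (out ++ [e]).length (out.length :: s) = .found start i := by
        simpa using h
      obtain ⟨u', c, v, sp, hrest, hlen, hfold, hc1, hc2, hsi, hgap, hopn, hbet⟩ :=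
        ih (out.length :: s) (out ++ [e]) start i h' (pv_inv_push out s e ho hinv)
      refine ⟨e :: u', c, v, sp, by simp [hrest], by simp at hlen ⊢; omega, ?_, hc1, hc2, hsi, hgap, ?_, ?_⟩
      · have hst : pvStepB (out, s) e = (out ++ [e], out.length :: s) := by
          simp [pvStepB, ho]
        simp only [List.foldl_cons, hst]
        rw [hfold]
        simp
      · have : out ++ e :: u' = (out ++ [e]) ++ u' := by simp
        rw [this]; exact hopn
      · have : out ++ e :: u' = (out ++ [e]) ++ u' := by simp
        rw [this]; exact hbet
    · rw [if_neg ho] at h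
      simp only [Bool.not_eq_true] at ho
      by_cases hc : e = "</mrow>"
      · rw [if_pos hc] at h
        match s with
        | [] => exact absurd h (by simp)
        | start' :: s' =>
          dsimp only at h
          by_cases hg : (out.length : Int) - (start' : Int) ≤ 2
          · rw [if_pos hg] at h
            injection h with hA hB
            have hA' := hA.symm
            subst hA'; subst hB
            have hslt : start < out.length := (hinv.2.1 start (List.mem_cons_self)).1
            refine ⟨[], e, rest, s', by simp, by simp, by simp, ho, hc, hslt, by simpa using hg, ?_, ?_⟩
            · simpa using (hinv.2.1 start (List.mem_cons_self)).2
            · intro t ht1 ht2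
              simp only [List.append_nil]
              have ht3 : t < out.length := ht2
              constructor
              · by_contra hop
                simp only [Bool.not_eq_false] at hop
                rcases hinv.2.2.1 t ht3 hop with hmem | ⟨cc, hcc1, hcc2, hcc3⟩
                · rcases List.mem_cons.mp hmem with rfl | hmem
                  · omega
                  · have := (List.pairwise_cons.mp hinv.1).1 t hmem
                    omega
                · -- a close strictly between start and out.length: impossible since the gap is ≤ 2
                  have : (out.length : Int) - (start : Int) ≤ 2 := by simpa using hg
                  omega
              · intro heq
                have hcl : pvCl (out.getD t "") = true := by
                  rw [heq]; decide
                obtain ⟨j', hj1, hj2⟩ := hinv.2.2.2 t ht3 hcl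
                rcases hj2 start (List.mem_cons_self) with hlt | hlt
                · have : (out.length : Int) - (start : Int) ≤ 2 := by simpa using hg
                  omega
                · omega
          · rw [if_neg hg] at h
            have h' : pvScanA rest (out ++ [e]).length s' = .found start i := by simpa using h
            obtain ⟨u', c, v, sp, hrest, hlen, hfold, hc1, hc2, hsi, hgap, hopn, hbet⟩ :=
              ih s' (out ++ [e]) start i h' (pv_inv_pop out start' s' e ho hc hg hinv)
            refine ⟨e :: u', c, v, sp, by simp [hrest], by simp at hlen ⊢; omega, ?_, hc1, hc2, hsi, hgap, ?_, ?_⟩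
            · have hst : pvStepB (out, start' :: s') e = (out ++ [e], s') := by
                subst hc; simp [pvStepB, pv_opn_close, hg]
              simp only [List.foldl_cons, hst]
              rw [hfold]
              simp
            · have : out ++ e :: u' = (out ++ [e]) ++ u' := by simp
              rw [this]; exact hopn
            · have : out ++ e :: u' = (out ++ [e]) ++ u' := by simp
              rw [this]; exact hbet
      · rw [if_neg hc] at h
        have h' : pvScanA rest (out ++ [e]).length s = .found start i := by simpa using h
        obtain ⟨u', c, v, sp, hrest, hlen, hfold, hc1, hc2, hsi, hgap, hopn, hbet⟩ :=
          ih s (out ++ [e]) start i h' (pv_inv_neutral out s e ho hc hinv)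
        refine ⟨e :: u', c, v, sp, by simp [hrest], by simp at hlen ⊢; omega, ?_, hc1, hc2, hsi, hgap, ?_, ?_⟩
        · have hst : pvStepB (out, s) e = (out ++ [e], s) := by
            simp [pvStepB, ho, hc]
          simp only [List.foldl_cons, hst]
          rw [hfold]
          simp
        · have : out ++ e :: u' = (out ++ [e]) ++ u' := by simp
          rw [this]; exact hopn
        · have : out ++ e :: u' = (out ++ [e]) ++ u' := by simp
          rw [this]; exact hbet

theorem pv_noerr : ∀ (rest : List String) (k : Nat) (s : List Nat),
    (∀ n, n ≤ rest.length → (rest.take n).countP pvCl ≤ (rest.take n).countP pvOpn + s.length) →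
    pvScanA rest k s ≠ .err := by
  intro rest
  induction rest with
  | nil => intro k s _ h; simp [pvScanA] at h
  | cons e rest ih =>
    intro k s hbal h
    simp only [pvScanA] at h
    by_cases ho : pvOpn e
    · rw [if_pos ho] at h
      refine ih (k+1) (k :: s) ?_ h
      intro n hn
      have := hbal (n+1) (by simp; omega)
      simp [pvCl, ho] at this ⊢
      omega
    · rw [if_neg ho] at h
      simp only [Bool.not_eq_true] at ho
      by_cases hc : e = "</mrow>"
      · rw [if_pos hc] at h
        have hcl : pvCl e = true := by rw [hc]; decide
        match s with
        | [] =>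
          have := hbal 1 (by simp)
          rw [hc] at this
          simp [pvCl, pv_opn_close] at this
        | start :: s' =>
          dsimp only at h
          by_cases hg : (k : Int) - (start : Int) ≤ 2
          · rw [if_pos hg] at h; simp at h
          · rw [if_neg hg] at h
            refine ih (k+1) s' ?_ h
            intro n hn
            have := hbal (n+1) (by simp; omega)
            simp only [List.take_succ_cons, List.countP_cons, hcl, ho] at this ⊢
            simp at this ⊢
            omega
      · rw [if_neg hc] at h
        refine ih (k+1) s ?_ h
        intro n hn
        have := hbal (n+1) (by simp; omega)
        have hcl : pvCl e = false := by simp [pvCl, ho, hc]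
        simpa [List.countP_cons, hcl, ho] using this

theorem pv_inv_nil : pvInv [] [] := by
  refine ⟨List.Pairwise.nil, by simp, by simp, by simp⟩

theorem pv_neutral_fold : ∀ (m : List String) (st : List String × List Nat),
    (∀ x ∈ m, pvOpn x = false ∧ x ≠ "</mrow>") →
    List.foldl pvStepB st m = (st.1 ++ m, st.2) := by
  intro m
  induction m with
  | nil => intro st _; simp
  | cons x m ih =>
    intro st hm
    have hx := hm x (List.mem_cons_self)
    have hst : pvStepB st x = (st.1 ++ [x], st.2) := by
      simp [pvStepB, hx.1, hx.2]
    simp only [List.foldl_cons, hst]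
    rw [ih (st.1 ++ [x], st.2) (fun y hy => hm y (List.mem_cons_of_mem _ hy))]
    simp

theorem pv_len_fold_le : ∀ (w : List String) (st : List String × List Nat),
    (List.foldl pvStepB st w).1.length ≤ st.1.length + w.length := by
  intro w
  induction w with
  | nil => intro st; simp
  | cons e w ih =>
    intro st
    have hstep : (pvStepB st e).1.length ≤ st.1.length + 1 := by
      unfold pvStepB
      split_ifs with h1 h2
      · simp
      · match h : st.2 with
        | [] => simp
        | start :: s' =>
          dsimp only
          split_ifs with h3
          · have := List.length_eraseIdx_le st.1 start; simp; omega
          · simp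
      · simp
    have := ih (pvStepB st e)
    simp only [List.foldl_cons, List.length_cons]
    omega

theorem pv_step_cases : ∀ (st : List String × List Nat) (e : String),
    (∃ s', pvStepB st e = (st.1 ++ [e], s')) ∨ (pvStepB st e).1.length ≤ st.1.length := by
  intro st e
  unfold pvStepB
  split_ifs with h1 h2
  · exact Or.inl ⟨st.1.length :: st.2, rfl⟩
  · match h : st.2 with
    | [] => exact Or.inl ⟨[], rfl⟩
    | start :: s' =>
      dsimp only
      split_ifs with h3
      · exact Or.inr (by simpa using List.length_eraseIdx_le st.1 start)
      · exact Or.inl ⟨s', rfl⟩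
  · exact Or.inl ⟨st.2, rfl⟩

theorem pv_fold_prefix : ∀ (w1 w2 : List String) (st : List String × List Nat),
    (List.foldl pvStepB st (w1 ++ w2)).1 = st.1 ++ (w1 ++ w2) →
    ∃ s1, List.foldl pvStepB st w1 = (st.1 ++ w1, s1) := by
  intro w1
  induction w1 with
  | nil => intro w2 st _; exact ⟨st.2, by simp⟩
  | cons e w1 ih =>
    intro w2 st hfull
    rcases pv_step_cases st e with ⟨s', hs'⟩ | hlen
    · have hfull' : (List.foldl pvStepB (st.1 ++ [e], s') (w1 ++ w2)).1
          = (st.1 ++ [e]) ++ (w1 ++ w2) := by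
        have : List.foldl pvStepB st ((e :: w1) ++ w2)
            = List.foldl pvStepB (st.1 ++ [e], s') (w1 ++ w2) := by
          simp [List.foldl_cons, hs']
        rw [← this, hfull]
        simp
      obtain ⟨s1, hs1⟩ := ih w2 (st.1 ++ [e], s') hfull'
      refine ⟨s1, ?_⟩
      simp only [List.foldl_cons, hs']
      rw [hs1]
      simp
    · exfalso
      have hb := pv_len_fold_le (w1 ++ w2) (pvStepB st e)
      have : (List.foldl pvStepB st ((e :: w1) ++ w2)).1.length
          = st.1.length + (w1.length + w2.length) + 1 := by
        rw [hfull]; simp; omega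
      simp only [List.cons_append, List.foldl_cons] at this
      simp only [List.length_append] at hb this
      omega

-- removing an eligible pair keeps every prefix balanced
theorem pv_pre_pres : ∀ (p : List String) (o : String) (m : List String) (c : String) (v : List String),
    pvOpn o = true → pvCl c = true → (∀ x ∈ m, pvOpn x = false ∧ x ≠ "</mrow>") →
    Pre_remove_single_mrow_pairs (p ++ o :: (m ++ c :: v)) →
    Pre_remove_single_mrow_pairs (p ++ m ++ v) := by
  intro p o m c v hopn hcl hm hpre n hn
  have hco : pvCl o = false := by simp [pvCl, hopn]
  have hoc : pvOpn c = false := by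
    cases hpo : pvOpn c
    · rfl
    · rw [pvCl, hpo] at hcl; simp at hcl
  have hmo : m.countP pvOpn = 0 := by
    refine List.countP_eq_zero.mpr ?_; intro x hx; simp [(hm x hx).1]
  have hmc : m.countP pvCl = 0 := by
    refine List.countP_eq_zero.mpr ?_; intro x hx; simp [pvCl, (hm x hx).1, (hm x hx).2]
  have hpn : (p ++ o :: (m ++ c :: v)).length = p.length + m.length + v.length + 2 := by
    simp; omega
  have hp0 : p.countP pvCl ≤ p.countP pvOpn := by
    have := hpre p.length (by omega)
    rwa [List.take_append_of_le_length le_rfl, List.take_length] at this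
  simp only [List.length_append] at hn
  rcases Nat.lt_or_ge p.length n with h1 | h1
  · rcases Nat.lt_or_ge (p.length + m.length) n with h2 | h2
    · -- n beyond p ++ m : compare with the original prefix two elements longer
      set q := n - p.length - m.length with hq
      have hqv : q ≤ v.length := by omega
      have e1 : (p ++ m ++ v).take n = (p ++ m) ++ v.take q := by
        have : n = (p ++ m).length + q := by simp; omega
        rw [this, List.take_length_add_append]
      have e2 : (p ++ o :: (m ++ c :: v)).take (n + 2)
          = (p ++ o :: (m ++ [c])) ++ v.take q := by
        have hsplit : p ++ o :: (m ++ c :: v) = (p ++ o :: (m ++ [c])) ++ v := by simp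
        have : n + 2 = (p ++ o :: (m ++ [c])).length + q := by simp; omega
        rw [hsplit, this, List.take_length_add_append]
      have := hpre (n + 2) (by omega)
      rw [e2] at this
      rw [e1]
      simp only [List.countP_append, List.countP_cons, hco, hoc, hmo, hmc, hopn, hcl] at this ⊢
      simp at this ⊢
      omega
    · -- n inside p ++ m
      set r := n - p.length with hr
      have hrm : r ≤ m.length := by omega
      have e1 : (p ++ m ++ v).take n = p ++ m.take r := by
        have : n = p.length + r := by omega
        rw [List.append_assoc, this, List.take_length_add_append,
          List.take_append_of_le_length hrm]
      have hmo' : (m.take r).countP pvOpn = 0 := by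
        refine List.countP_eq_zero.mpr ?_
        intro x hx; simp [(hm x (List.mem_of_mem_take hx)).1]
      have hmc' : (m.take r).countP pvCl = 0 := by
        refine List.countP_eq_zero.mpr ?_
        intro x hx
        simp [pvCl, (hm x (List.mem_of_mem_take hx)).1, (hm x (List.mem_of_mem_take hx)).2]
      rw [e1]
      simp only [List.countP_append, hmo', hmc']
      omega
  · -- n within p
    have e1 : (p ++ m ++ v).take n = p.take n := by
      rw [List.append_assoc, List.take_append_of_le_length h1]
    have e2 : (p ++ o :: (m ++ c :: v)).take n = p.take n := List.take_append_of_le_length h1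
    have := hpre n (by omega)
    rw [e2] at this
    rw [e1]
    exact this

theorem remove_single_mrow_pairs_spec' : ∀ (lst : List String),
    Pre_remove_single_mrow_pairs lst → remove_single_mrow_pairs lst = remove_single_mrow_pairs_alt lst := by
  suffices H : ∀ (N : Nat) (lst : List String), lst.length ≤ N →
      Pre_remove_single_mrow_pairs lst →
      remove_single_mrow_pairs lst = remove_single_mrow_pairs_alt lst by
    intro lst h
    exact H lst.length lst le_rfl h
  intro N
  induction N with
  | zero =>
    intro lst hl _
    have hnil : lst = [] := by
      cases lst with
      | nil => rfl
      | cons a l => simp at hl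
    subst hnil
    rw [remove_single_mrow_pairs.eq_def]
    simp [pvScanA, remove_single_mrow_pairs_alt]
  | succ N ih =>
    intro lst hl hpre
    rw [remove_single_mrow_pairs.eq_def]
    split
    next start i heq =>
      obtain ⟨u, c, v, sp, hrest, hlen, hfold, hc1, hc2, hsi, hgap, hopn, hbet⟩ :=
        pv_found_main lst [] [] start i heq pv_inv_nil
      simp only [List.nil_append, List.length_nil, Nat.zero_add] at hfold hopn hbet hlen
      have hstart : start < u.length := by omega
      have hul : u.length = i := hlen
      have hu : u = u.take start ++ u.getD start "" :: u.drop (start + 1) := by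
        conv_lhs => rw [← List.take_append_drop start u]
        rw [List.drop_eq_getElem_cons hstart, List.getD_eq_getElem u "" hstart]
      set p := u.take start with hp
      set o := u.getD start "" with hodef
      set m := u.drop (start + 1) with hmdef
      have hplen : p.length = start := by
        rw [hp, List.length_take]; omega
      have hmlen : m.length = u.length - (start + 1) := by
        rw [hmdef, List.length_drop]
      have hople : pvOpn o = true := hopn
      have hcl_c : pvCl c = true := by rw [pvCl, hc1, hc2]; rfl
      have hm : ∀ x ∈ m, pvOpn x = false ∧ x ≠ "</mrow>" := by
        intro x hx
        obtain ⟨j, hj, hjx⟩ := List.mem_iff_getElem.mp hx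
        have hj2 : start + 1 + j < u.length := by omega
        have hxu : x = u[start + 1 + j] := by
          subst hjx
          simp only [hmdef, List.getElem_drop]
        have := hbet (start + 1 + j) (by omega) (by omega)
        rw [List.getD_eq_getElem u "" hj2] at this
        rw [hxu]
        exact this
      have hlst : lst = p ++ o :: (m ++ c :: v) := by
        rw [hrest]
        conv_lhs => rw [hu]
        simp only [List.append_assoc, List.cons_append]
      have hpre' : Pre_remove_single_mrow_pairs (p ++ m ++ v) :=
        pv_pre_pres p o m c v hople hcl_c hm (hlst ▸ hpre)
      have hupm : u.eraseIdx start = p ++ m := by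
        conv_lhs => rw [hu, ← hplen]
        rw [List.eraseIdx_append_of_length_le le_rfl]
        simp only [Nat.sub_self, List.eraseIdx_zero, List.tail_cons]
      have hred : (lst.eraseIdx i).eraseIdx start = p ++ m ++ v := by
        rw [hrest, ← hul, List.eraseIdx_append_of_length_le le_rfl]
        simp only [Nat.sub_self, List.eraseIdx_zero, List.tail_cons]
        rw [List.eraseIdx_append_of_lt_length hstart v, hupm]
      have hll : (p ++ m ++ v).length ≤ N := by
        have : lst.length = p.length + (m.length + (v.length + 2)) := by
          rw [hlst]; simp; omega
        simp only [List.length_append]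
        omega
      rw [hred, ih (p ++ m ++ v) hll hpre']
      -- both sides are B applied; show the folds agree
      obtain ⟨s1, hs1⟩ := pv_fold_prefix p (o :: m) ([], []) (by rw [← hu, hfold]; simp)
      simp only [List.nil_append] at hs1
      have hfold2 : List.foldl pvStepB (p, s1) (o :: m) = (u, start :: s1) := by
        simp only [List.foldl_cons]
        have hstepo : pvStepB (p, s1) o = (p ++ [o], start :: s1) := by
          simp [pvStepB, hople, hplen]
        rw [hstepo, pv_neutral_fold m _ hm]
        conv_rhs => rw [hu]
        simp
      have hs1sp : s1 = sp := by
        have h2 : List.foldl pvStepB ([], []) u = (u, start :: s1) := by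
          conv_lhs => rw [hu]
          rw [List.foldl_append, hs1, hfold2]
        rw [hfold] at h2
        have := congrArg Prod.snd h2
        simp at this
        exact this.symm

      have hgap' : ((u.length : Int) - (start : Int) ≤ 2) := by
        rw [hul]; exact hgap
      have hstepc : pvStepB (u, start :: sp) c = (p ++ m, sp) := by
        subst hc2
        simp [pvStepB, pv_opn_close, hgap', hupm]
      have hmidfold : List.foldl pvStepB ([], []) (p ++ m) = (p ++ m, sp) := by
        rw [List.foldl_append, hs1, pv_neutral_fold m _ hm, hs1sp]
      rw [remove_single_mrow_pairs_alt, remove_single_mrow_pairs_alt, hrest]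
      conv_rhs => rw [List.foldl_append, hfold]
      conv_lhs => rw [List.foldl_append, hmidfold]
      simp only [List.foldl_cons, hstepc]
    next heq =>
      have := pv_clean_fold lst [] [] heq
      rw [remove_single_mrow_pairs_alt, this]
      simp
    next heq =>
      exact absurd heq (pv_noerr lst 0 []
        (fun n hn => by simpa using hpre n hn))

-- ===== VERDICT (by name: the statement is the Claim_ definition above) =====
theorem remove_single_mrow_pairs_spec : Claim_equal_remove_single_mrow_pairs := by
  intro lst _ hpre
  exact remove_single_mrow_pairs_spec' lst hpre
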